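-- pv_equiv track=rewrite | github.com/geovani-moc/Simulated-Annealing | simulatedAnnealing.py | checkLinha
-- ===== SOURCE A (Python) =====
-- def checkLinha(item):
--     tam = len(item)
--     result = 0
--     for i in range (0,tam):
--         aux =0
--         for j in range(0,tam):
--             if item[j][i] == 1:
--                 aux +=1
--         if aux > 1:
--             result += aux-1
--     return result
-- ===== SOURCE B (Python) =====
-- def checkLinha(item):
--     tam = len(item)
--     seen = set()
--     result = 0
--     for row in item:
--         for i in range(tam):
--             if row[i] == 1:
--                 if i in seen:
--                     result += 1
--                 else:
--                     seen.add(i)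
--     return result
-- ===== Notes on version B (the rewrite author's own statement) =====
-- stated objective: alternative
-- what changed: B never tallies per-column counts or sums excesses: it streams the matrix once row-major with a seen-set of columns, counting every 1 that is not the first 1 of its column (each such duplicate is exactly one unit of conflict).
import Mathlib
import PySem

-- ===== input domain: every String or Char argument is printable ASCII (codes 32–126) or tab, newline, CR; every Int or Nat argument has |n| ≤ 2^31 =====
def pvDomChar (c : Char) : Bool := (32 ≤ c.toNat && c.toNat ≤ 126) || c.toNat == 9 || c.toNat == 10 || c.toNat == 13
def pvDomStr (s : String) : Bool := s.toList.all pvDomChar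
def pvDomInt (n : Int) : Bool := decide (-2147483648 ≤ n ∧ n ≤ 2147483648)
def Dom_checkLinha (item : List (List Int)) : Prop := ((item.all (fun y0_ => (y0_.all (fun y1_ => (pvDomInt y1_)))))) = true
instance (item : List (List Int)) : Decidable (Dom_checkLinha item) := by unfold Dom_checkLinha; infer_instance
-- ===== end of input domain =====

-- B streams the matrix once with a seen-set of columns, counting each 1 that is not the first
-- 1 of its column — no per-column counting and no excess-summing pass (alternative algorithm).

-- ===== PORT A =====
def checkLinha (item : List (List Int)) : Int :=
  let tam : Int := item.length
  (PySem.List.pyRange 0 tam 1).foldl (fun result i =>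
    let aux : Int := (PySem.List.pyRange 0 tam 1).foldl (fun aux j =>
      if PySem.List.pyGetD (PySem.List.pyGetD item j []) i 0 = 1 then aux + 1 else aux) 0
    if aux > 1 then result + (aux - 1) else result) 0

-- ===== PORT B =====
def checkLinha_alt (item : List (List Int)) : Int :=
  let tam : Int := item.length
  let st : Int × PySem.Set Int :=
    item.foldl (fun st row =>
      (PySem.List.pyRange 0 tam 1).foldl (fun (st : Int × PySem.Set Int) i =>
        if PySem.List.pyGetD row i 0 = 1 then
          (if PySem.Set.contains st.2 i then (st.1 + 1, st.2)
           else (st.1, PySem.Set.add st.2 i))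
        else st) st) ((0 : Int), (PySem.Set.empty : PySem.Set Int))
  st.1

-- ===== PRECONDITION & SPEC =====
-- Pre_ excludes exactly the inputs on which the Python programs raise IndexError: some row
-- shorter than the number of rows (row[i] with i up to len(item)-1 then goes out of range).
def Pre_checkLinha (item : List (List Int)) : Prop :=
  ∀ row ∈ item, item.length ≤ row.length
instance (item : List (List Int)) : Decidable (Pre_checkLinha item) := by
  unfold Pre_checkLinha; infer_instance
def pvWitness_checkLinha : List (List Int) := [[1, 0], [1, 1]]
def Spec_checkLinha (item : List (List Int)) (out : Int) : Prop := out = checkLinha_alt item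
instance (item : List (List Int)) (out : Int) : Decidable (Spec_checkLinha item out) := by
  unfold Spec_checkLinha; infer_instance

-- ===== CLAIM (what is proved, stated in full; the proofs are below) =====
def Claim_equal_checkLinha : Prop := ∀ (item : List (List Int)), Dom_checkLinha item → Pre_checkLinha item → Spec_checkLinha item (checkLinha item)

-- ===== LEMMAS AND PROOFS =====

-- column hit / column count of a list of rows
def pvHit (r : List Int) (k : Nat) : Bool := decide (r.getD k 0 = 1)
def pvCnt (rows : List (List Int)) (k : Nat) : Nat := rows.countP (fun r => pvHit r k)
def pvCast : List Nat → List Int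
  | [] => []
  | k :: l => ((k : Int)) :: pvCast l

-- membership in the cast list
theorem pv_mem_pvCast (l : List Nat) (x : Int) :
    x ∈ pvCast l ↔ ∃ k ∈ l, ((k : Int)) = x := by
  induction l with
  | nil => simp [pvCast]
  | cons a l ih =>
      simp only [pvCast, List.mem_cons, ih]
      constructor
      · rintro (h | ⟨k, hk, hkx⟩)
        · exact ⟨a, Or.inl rfl, h.symm⟩
        · exact ⟨k, Or.inr hk, hkx⟩
      · rintro ⟨k, hk, hkx⟩
        rcases hk with h | h
        · subst h; exact Or.inl hkx.symm
        · exact Or.inr ⟨k, h, hkx⟩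

-- pull the conditional increment out of A's accumulator
theorem pv_ite_add (c : Prop) [Decidable c] (res x : Int) :
    (if c then res + x else res) = res + (if c then x else 0) := by
  split_ifs <;> simp

-- Bool equality from the ↔ of the coercions
theorem pv_bool_eq {a b : Bool} (h : a = true ↔ b = true) : a = b := by
  cases a <;> cases b <;> simp_all

-- summing the 0/1 column indicator over the rows is the column count
theorem pv_sum_indicator (k : Nat) :
    ∀ (l : List (List Int)),
    (l.map (fun row => if row.getD k 0 = 1 then (1 : Int) else 0)).sum
      = ((pvCnt l k : Nat) : Int) := by
  intro l
  induction l with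
  | nil => simp [pvCnt]
  | cons r l ih =>
      rw [List.map_cons, List.sum_cons, ih]
      unfold pvCnt
      rw [List.countP_cons]
      by_cases h : r.getD k 0 = 1
      · rw [if_pos h]
        simp only [pvHit, decide_eq_true h, if_true]
        push_cast
        ring
      · rw [if_neg h]
        simp only [pvHit, decide_eq_false h, Bool.false_eq_true, if_false]
        push_cast
        ring

-- reading the rows through range-indexed getD is reading the matrix itself
theorem pv_map_range_getD (item : List (List Int)) :
    (List.range item.length).map (fun y => item.getD y []) = item := by
  apply List.ext_getElem
  · simp
  · intro i h1 h2
    simp [List.getElem?_eq_getElem h2]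

-- A's inner column loop counts the rows hitting column k
theorem pvA_inner (item : List (List Int)) (k : Nat) :
    (List.range item.length).foldl
        (fun (x : Int) (y : Nat) => x + if (item.getD y []).getD k 0 = 1 then 1 else 0) 0
      = ((pvCnt item k : Nat) : Int) := by
  rw [PySem.List.foldl_add, zero_add,
    show (fun y : Nat => if (item.getD y []).getD k 0 = 1 then (1 : Int) else 0)
        = (fun row : List Int => if row.getD k 0 = 1 then (1 : Int) else 0)
            ∘ (fun y : Nat => item.getD y []) from rfl,
    ← List.map_map, pv_map_range_getD]
  exact pv_sum_indicator k item

-- A is the sum over columns of the (truncated) excess count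
theorem pvA (item : List (List Int)) :
    checkLinha item
      = ((List.range item.length).map (fun k => ((pvCnt item k - 1 : Nat) : Int))).sum := by
  unfold checkLinha
  simp only [PySem.List.pyRange_one, Int.sub_zero, Int.toNat_natCast, List.foldl_map,
    Int.zero_add, PySem.List.pyGetD_natCast, pv_ite_add]
  rw [PySem.List.foldl_add, zero_add]
  apply congrArg
  apply List.map_congr_left
  intro k hk
  rw [pvA_inner]
  split_ifs with h <;> omega

-- B's inner loop on one row: adds the number of already-seen hit columns, appends new hit columns
theorem pv_inner (r : List Int) :
    ∀ (c m : Nat) (res : Int) (s : PySem.Set Int),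
    (List.range' m c).foldl
        (fun (st : Int × PySem.Set Int) (k : Nat) =>
          if r.getD k 0 = 1 then
            (if PySem.Set.contains st.2 ((k : Int)) then (st.1 + 1, st.2)
             else (st.1, PySem.Set.add st.2 ((k : Int))))
          else st) (res, s)
      = (res + ((List.range' m c).countP
            (fun k => pvHit r k && PySem.Set.contains s ((k : Int)))),
         s ++ pvCast ((List.range' m c).filter
            (fun k => pvHit r k && !PySem.Set.contains s ((k : Int))))) := by
  intro c
  induction c with
  | zero =>
      intro m res s
      simp [List.range'_zero, pvCast]
  | succ c ih =>
      intro m res s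
      rw [List.range'_succ, List.foldl_cons]
      by_cases hhit : r.getD m 0 = 1
      · by_cases hseen : ((m : Int)) ∈ s
        · have hc : PySem.Set.contains s ((m : Int)) = true :=
            (PySem.Set.contains_iff s _).mpr hseen
          have h1 : (if r.getD m 0 = 1 then
                (if PySem.Set.contains s ((m : Int)) then (res + 1, s)
                 else (res, PySem.Set.add s ((m : Int))))
              else (res, s)) = (res + 1, s) := by
            rw [if_pos hhit, if_pos hc]
          rw [h1, ih]
          have hpm : (pvHit r m && PySem.Set.contains s ((m : Int))) = true := by
            unfold pvHit
            rw [decide_eq_true hhit, hc]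
            rfl
          have hfm : (pvHit r m && !PySem.Set.contains s ((m : Int))) = false := by
            unfold pvHit
            rw [decide_eq_true hhit, hc]
            rfl
          congr 1
          · simp only [List.countP_cons, hpm, if_true]
            push_cast
            ring
          · simp only [List.filter_cons, hfm, Bool.false_eq_true, if_false]
        · have hc : PySem.Set.contains s ((m : Int)) = false := by
            cases hb : PySem.Set.contains s ((m : Int)) with
            | false => rfl
            | true => exact absurd ((PySem.Set.contains_iff s _).mp hb) hseen
          have h1 : (if r.getD m 0 = 1 then
                (if PySem.Set.contains s ((m : Int)) then (res + 1, s)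
                 else (res, PySem.Set.add s ((m : Int))))
              else (res, s)) = (res, s ++ [((m : Int))]) := by
            rw [if_pos hhit,
              if_neg (fun hcon => hseen ((PySem.Set.contains_iff s _).mp hcon)),
              PySem.Set.add_of_not_mem hseen]
          rw [h1, ih]
          have hcongr : ∀ k ∈ List.range' (m + 1) c,
              PySem.Set.contains (s ++ [((m : Int))]) ((k : Int))
                = PySem.Set.contains s ((k : Int)) := by
            intro k hk
            have hkm : k ≠ m := by
              have h := List.mem_range'_1.mp hk; omega
            apply pv_bool_eq
            rw [PySem.Set.contains_iff, PySem.Set.contains_iff]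
            simp only [List.mem_append, List.mem_singleton]
            constructor
            · rintro (h | h)
              · exact h
              · exact absurd (by exact_mod_cast h) hkm
            · intro h; exact Or.inl h
          have hcount :
              (List.range' (m + 1) c).countP
                  (fun k => pvHit r k && PySem.Set.contains (s ++ [((m : Int))]) ((k : Int)))
                = (List.range' (m + 1) c).countP
                  (fun k => pvHit r k && PySem.Set.contains s ((k : Int))) :=
            List.countP_congr (fun k hk => by rw [hcongr k hk])
          have hfilter :
              (List.range' (m + 1) c).filter
                  (fun k => pvHit r k && !PySem.Set.contains (s ++ [((m : Int))]) ((k : Int)))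
                = (List.range' (m + 1) c).filter
                  (fun k => pvHit r k && !PySem.Set.contains s ((k : Int))) :=
            List.filter_congr (fun k hk => by rw [hcongr k hk])
          rw [hcount, hfilter]
          have hpm : (pvHit r m && PySem.Set.contains s ((m : Int))) = false := by
            unfold pvHit
            rw [decide_eq_true hhit, hc]
            rfl
          have hfm : (pvHit r m && !PySem.Set.contains s ((m : Int))) = true := by
            unfold pvHit
            rw [decide_eq_true hhit, hc]
            rfl
          congr 1
          · simp only [List.countP_cons, hpm, Bool.false_eq_true, if_false, Nat.add_zero]
          · simp only [List.filter_cons, hfm, if_true, pvCast]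
            rw [List.append_assoc]
            rfl
      · have h1 : (if r.getD m 0 = 1 then
              (if PySem.Set.contains s ((m : Int)) then (res + 1, s)
               else (res, PySem.Set.add s ((m : Int))))
            else (res, s)) = (res, s) := by
          rw [if_neg hhit]
        rw [h1, ih]
        have hpm : (pvHit r m && PySem.Set.contains s ((m : Int))) = false := by
          unfold pvHit
          rw [decide_eq_false hhit]
          rfl
        have hfm : (pvHit r m && !PySem.Set.contains s ((m : Int))) = false := by
          unfold pvHit
          rw [decide_eq_false hhit]
          rfl
        congr 1
        · simp only [List.countP_cons, hpm, Bool.false_eq_true, if_false, Nat.add_zero]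
        · simp only [List.filter_cons, hfm, Bool.false_eq_true, if_false]

-- pv_inner over List.range
theorem pv_inner0 (r : List Int) (N : Nat) (res : Int) (s : PySem.Set Int) :
    (List.range N).foldl
        (fun (st : Int × PySem.Set Int) (k : Nat) =>
          if r.getD k 0 = 1 then
            (if PySem.Set.contains st.2 ((k : Int)) then (st.1 + 1, st.2)
             else (st.1, PySem.Set.add st.2 ((k : Int))))
          else st) (res, s)
      = (res + ((List.range N).countP
            (fun k => pvHit r k && PySem.Set.contains s ((k : Int)))),
         s ++ pvCast ((List.range N).filter
            (fun k => pvHit r k && !PySem.Set.contains s ((k : Int))))) := by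
  rw [List.range_eq_range']
  exact pv_inner r N 0 res s

-- B's outer loop: the seen set realizes a column predicate P; the counter accumulates,
-- per column, the full count (already-seen column) or the count minus the first hit
theorem pv_outer (N : Nat) :
    ∀ (rows : List (List Int)) (res : Int) (s : PySem.Set Int) (P : Nat → Bool),
    (∀ k : Nat, PySem.Set.contains s ((k : Int)) = P k) →
    (rows.foldl (fun (st : Int × PySem.Set Int) row =>
        (List.range N).foldl (fun (st : Int × PySem.Set Int) (k : Nat) =>
          if row.getD k 0 = 1 then
            (if PySem.Set.contains st.2 ((k : Int)) then (st.1 + 1, st.2)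
             else (st.1, PySem.Set.add st.2 ((k : Int))))
          else st) st) (res, s)).1
      = res + ((List.range N).map
          (fun k => (((if P k then pvCnt rows k else pvCnt rows k - 1) : Nat) : Int))).sum := by
  intro rows
  induction rows with
  | nil =>
      intro res s P hP
      simp [pvCnt]
  | cons r rest ih =>
      intro res s P hP
      rw [List.foldl_cons, pv_inner0]
      simp only [hP]
      have hP' : ∀ k : Nat,
          PySem.Set.contains
            (s ++ pvCast ((List.range N).filter (fun k => pvHit r k && !P k))) ((k : Int))
            = (P k || (decide (k < N) && pvHit r k)) := by
        intro k
        have hmem : ((((k : Nat)) : Int) ∈ s) ↔ P k = true := by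
          rw [← PySem.Set.contains_iff s ((k : Int)), hP k]
        apply pv_bool_eq
        rw [PySem.Set.contains_iff]
        rw [List.mem_append, pv_mem_pvCast]
        simp only [List.mem_filter, List.mem_range,
          Bool.or_eq_true, Bool.and_eq_true, Bool.not_eq_true', decide_eq_true_eq, hmem]
        constructor
        · rintro (h | ⟨a, ⟨⟨haN, hh, hnp⟩, hak⟩⟩)
          · exact Or.inl h
          · have hak' : a = k := by exact_mod_cast hak
            subst hak'
            exact Or.inr ⟨haN, hh⟩
        · rintro (h | ⟨hkN, hh⟩)
          · exact Or.inl h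
          · by_cases hPk : P k = true
            · exact Or.inl hPk
            · have hPf : P k = false := by
                cases hPb : P k
                · rfl
                · exact absurd hPb hPk
              exact Or.inr ⟨k, ⟨⟨hkN, hh, hPf⟩, rfl⟩⟩
      rw [ih _ _ _ hP']
      rw [← PySem.List.sum_map_ite_one_zero (fun k => pvHit r k && P k) (List.range N)]
      rw [add_assoc, ← PySem.List.sum_map_add_int]
      apply congrArg
      apply congrArg
      apply List.map_congr_left
      intro k hk
      have hkN : k < N := List.mem_range.mp hk
      have hdk : decide (k < N) = true := decide_eq_true hkN
      have hcnt : pvCnt (r :: rest) k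
          = pvCnt rest k + (if pvHit r k = true then 1 else 0) := by
        unfold pvCnt
        simp [List.countP_cons]
      rw [hcnt]
      cases hp : P k <;> cases hh : pvHit r k <;>
        simp only [hp, hh, hdk, Bool.and_true, Bool.and_false, Bool.true_and, Bool.false_and,
          Bool.or_false, Bool.or_true, Bool.false_or, Bool.true_or, if_true, if_false,
          Bool.false_eq_true, Bool.true_eq_false, ite_true, ite_false] <;>
        omega

theorem pvB (item : List (List Int)) :
    checkLinha_alt item
      = ((List.range item.length).map (fun k => ((pvCnt item k - 1 : Nat) : Int))).sum := by
  unfold checkLinha_alt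
  simp only [PySem.List.pyRange_one, Int.sub_zero, Int.toNat_natCast, List.foldl_map,
    Int.zero_add, PySem.List.pyGetD_natCast]
  rw [pv_outer item.length item 0 PySem.Set.empty (fun _ => false) (fun k => rfl)]
  simp

-- ===== VERDICT (by name: the statement is the Claim_ definition above) =====
theorem checkLinha_spec : Claim_equal_checkLinha := by
  intro item _ _
  unfold Spec_checkLinha
  rw [pvA, pvB]
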